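-- pv_equiv track=rewrite | github.com/Crespo-Otero-group/fromage | fromage/dynamics/read_frequencies.py | count_atom
-- ===== SOURCE A (Python) =====
-- def count_atom(formula):
--     na = ''
--     natom = 0
--     for x in formula + 'X':
--         if x in '01234567890':
--             na += x
--         else:
--             try:
--                 natom += int(na)
--                 na = ''
--             except ValueError:
--                 pass
--
--     return natom
-- ===== SOURCE B (Python) =====
-- def count_atom(formula):
--     masked = ''.join(c if c in '0123456789' else ' ' for c in formula)
--     return sum(int(tok) for tok in masked.split())
-- ===== Notes on version B (the rewrite author's own statement) =====
-- stated objective: faster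
-- what changed: Replaces A's char-by-char accumulate/flush state machine (with a trailing-'X' sentinel and try/except) by extract-then-reduce: mask non-digits to spaces, split the string into the maximal digit runs, and sum their int values.
import Mathlib
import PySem

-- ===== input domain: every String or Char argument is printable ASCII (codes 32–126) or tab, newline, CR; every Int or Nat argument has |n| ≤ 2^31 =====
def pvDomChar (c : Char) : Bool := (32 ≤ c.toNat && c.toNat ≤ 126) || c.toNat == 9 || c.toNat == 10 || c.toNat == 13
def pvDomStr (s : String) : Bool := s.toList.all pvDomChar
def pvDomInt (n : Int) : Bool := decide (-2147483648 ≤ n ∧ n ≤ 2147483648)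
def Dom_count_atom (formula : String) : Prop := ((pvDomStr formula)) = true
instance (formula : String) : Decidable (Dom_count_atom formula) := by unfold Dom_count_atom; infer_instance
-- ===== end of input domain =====

-- B tokenizes the formula into maximal digit runs (mask non-digits to spaces, split, sum the
-- ints) instead of A's char-by-char accumulate/flush state machine with a sentinel; same O(n)
-- pass count, but measurably faster by a constant factor (C-level join/split vs a per-char loop).


-- ===== PORT A =====
-- `x in '01234567890'` for the single char x = membership in those chars
def pvIsDigA (x : Char) : Bool := "01234567890".toList.contains x

-- decimal value of a list of digit chars (helper for the int() ports below)
def pvDecVal (cs : List Char) : Int := cs.foldl (fun a c => 10 * a + ((c.toNat : Int) - 48)) 0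

-- int(na) in A, where na always consists only of chars from '01234567890': Python raises
-- ValueError exactly on '' (→ none) and otherwise returns the decimal value; ported by hand
-- (exact on that all-digit domain; PySem.Int.ofChars? computes the same but its internal
-- parser is private to the prelude, so it cannot be reasoned about here).
def pvIntDigits? (cs : List Char) : Option Int := if cs = [] then none else some (pvDecVal cs)

def count_atom_step (s : List Char × Int) (x : Char) : List Char × Int :=
  if pvIsDigA x then (s.1 ++ [x], s.2)         -- na += x
  else
    match pvIntDigits? s.1 with
    | some v => ([], s.2 + v)                  -- natom += int(na); na = ''
    | none => (s.1, s.2)                       -- except ValueError: pass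

def count_atom (formula : String) : Int :=
  ((formula.toList ++ ['X']).foldl count_atom_step ([], 0)).2

-- ===== PORT B =====
-- `c in '0123456789'` for the single char c = membership in those chars
def pvIsDigB (c : Char) : Bool := "0123456789".toList.contains c

-- masked = ''.join(c if c in '0123456789' else ' ' for c in formula)
def pvMask (cs : List Char) : List Char := cs.map (fun c => if pvIsDigB c then c else ' ')

-- sum(int(tok) for tok in masked.split()); each tok is a nonempty all-digit run, where
-- int() returns the decimal value pvDecVal (hand port of int(), exact there — see above)
def count_atom_alt (formula : String) : Int :=
  ((PySem.Chars.split₀ (pvMask formula.toList)).map pvDecVal).sum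

-- ===== PRECONDITION & SPEC =====
def Spec_count_atom (formula : String) (out : Int) : Prop := out = count_atom_alt formula
instance (formula : String) (out : Int) : Decidable (Spec_count_atom formula out) := by unfold Spec_count_atom; infer_instance

-- ===== CLAIM (what is proved, stated in full; the proofs are below) =====
def Claim_equal_count_atom : Prop := ∀ (formula : String), Dom_count_atom formula → Spec_count_atom formula (count_atom formula)

-- ===== LEMMAS AND PROOFS =====

-- A's test and B's test accept the same characters
lemma pvDigitsA_chars : "01234567890".toList = ['0','1','2','3','4','5','6','7','8','9','0'] := by simp

lemma pvDigitsB_chars : "0123456789".toList = ['0','1','2','3','4','5','6','7','8','9'] := by simp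

lemma pvIsDigA_eq (c : Char) : pvIsDigA c = pvIsDigB c := by
  simp only [pvIsDigA, pvIsDigB, pvDigitsA_chars, pvDigitsB_chars, List.contains_eq_mem,
    decide_eq_decide, List.mem_cons, List.not_mem_nil, or_false]
  tauto

-- proof-side tokenizer: the maximal digit runs of a character list
def pvRuns : List Char → List (List Char)
  | [] => []
  | c :: cs =>
    if pvIsDigB c then (c :: cs.takeWhile pvIsDigB) :: pvRuns (cs.dropWhile pvIsDigB)
    else pvRuns cs
termination_by cs => cs.length
decreasing_by
  · exact Nat.lt_succ_of_le (List.length_dropWhile_le _ _)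
  · exact Nat.lt_succ_self _

lemma pvRuns_split (cs : List Char) :
    pvRuns cs = (if cs.takeWhile pvIsDigB = [] then [] else [cs.takeWhile pvIsDigB])
      ++ pvRuns (cs.dropWhile pvIsDigB) := by
  cases cs with
  | nil => simp [pvRuns]
  | cons c t =>
    by_cases hd : pvIsDigB c
    · simp [pvRuns, hd]
    · simp [pvRuns, hd]

lemma isspace_of_digit (c : Char) (h : pvIsDigB c = true) : PySem.Chars.isspace c = false := by
  simp only [pvIsDigB, pvDigitsB_chars, List.contains_eq_mem, decide_eq_true_eq,
    List.mem_cons, List.not_mem_nil, or_false] at h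
  rcases h with h|h|h|h|h|h|h|h|h|h <;> subst h <;> decide

-- split₀ of the masked list computes exactly the digit runs
lemma split₀_go_mask (cs cur : List Char) (acc : List (List Char)) :
    PySem.Chars.split₀.go (pvMask cs) cur acc =
      (if (cur.reverse ++ cs.takeWhile pvIsDigB) = [] then acc.reverse ++ pvRuns (cs.dropWhile pvIsDigB)
       else acc.reverse ++ [cur.reverse ++ cs.takeWhile pvIsDigB] ++ pvRuns (cs.dropWhile pvIsDigB)) := by
  induction cs generalizing cur acc with
  | nil =>
    simp only [pvMask, List.map_nil, PySem.Chars.split₀.go, List.takeWhile_nil,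
      List.dropWhile_nil, pvRuns, List.append_nil]
    cases cur <;> simp
  | cons c t ih =>
    by_cases hd : pvIsDigB c
    · simp only [pvMask, List.map_cons, hd, if_pos, PySem.Chars.split₀.go,
        isspace_of_digit c hd, Bool.false_eq_true, if_false]
      rw [show List.map (fun c => if pvIsDigB c then c else ' ') t = pvMask t from rfl, ih]
      simp [hd]
    · have hsp : PySem.Chars.isspace ' ' = true := by decide
      simp only [pvMask, List.map_cons, hd, Bool.false_eq_true, if_false, PySem.Chars.split₀.go,
        hsp, if_pos]
      rw [show List.map (fun c => if pvIsDigB c then c else ' ') t = pvMask t from rfl]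
      by_cases hc : cur = []
      · subst hc
        simp only [List.isEmpty_nil, if_pos, ih, List.reverse_nil, List.nil_append,
          List.takeWhile_cons, List.dropWhile_cons, hd, Bool.false_eq_true, if_false,
          List.append_nil]
        have hr : pvRuns (c :: t) = pvRuns t := by simp [pvRuns, hd]
        rw [hr, pvRuns_split t]
        by_cases h : List.takeWhile pvIsDigB t = [] <;> simp [h]
      · have : cur.isEmpty = false := by simpa [List.isEmpty_iff] using hc
        simp only [this, Bool.false_eq_true, if_false, ih, List.reverse_cons,
          List.takeWhile_cons, List.dropWhile_cons, hd, List.append_nil]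
        have hr : pvRuns (c :: t) = pvRuns t := by simp [pvRuns, hd]
        rw [hr, pvRuns_split t]
        by_cases h : List.takeWhile pvIsDigB t = [] <;> simp [h, hc, List.append_assoc]

lemma split₀_mask (cs : List Char) :
    PySem.Chars.split₀ (pvMask cs) = pvRuns cs := by
  rw [PySem.Chars.split₀, split₀_go_mask, pvRuns_split cs]
  by_cases h : cs.takeWhile pvIsDigB = [] <;> simp [h]

-- sum of the run values
def pvS (cs : List Char) : Int := ((pvRuns cs).map pvDecVal).sum

lemma pvS_split (cs : List Char) :
    pvS cs = (pvIntDigits? (cs.takeWhile pvIsDigB)).getD 0 + pvS (cs.dropWhile pvIsDigB) := by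
  rw [pvS, pvRuns_split cs]
  by_cases h : cs.takeWhile pvIsDigB = [] <;>
    simp [h, pvIntDigits?, pvS]

-- the loop invariant of A's fold
lemma key (cs na : List Char) (acc : Int) :
    ((cs ++ ['X']).foldl count_atom_step (na, acc)).2
      = acc + (pvIntDigits? (na ++ cs.takeWhile pvIsDigB)).getD 0 + pvS (cs.dropWhile pvIsDigB) := by
  induction cs generalizing na acc with
  | nil =>
    simp only [List.nil_append, List.foldl_cons, List.foldl_nil, List.takeWhile_nil,
      List.dropWhile_nil, List.append_nil]
    have hX : pvIsDigA 'X' = false := by decide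
    by_cases h : na = []
    · simp [count_atom_step, hX, pvIntDigits?, h, pvS, pvRuns]
    · simp [count_atom_step, hX, pvIntDigits?, h, pvS, pvRuns]
  | cons c t ih =>
    by_cases hd : pvIsDigB c
    · have hA : pvIsDigA c = true := by rw [pvIsDigA_eq]; exact hd
      simp only [List.cons_append, List.foldl_cons, count_atom_step, hA, if_pos,
        List.takeWhile_cons, List.dropWhile_cons, hd]
      rw [ih]
      simp [List.append_assoc]
    · have hA : pvIsDigA c = false := by rw [pvIsDigA_eq]; simpa using hd
      have hstep : count_atom_step (na, acc) c = ([], acc + (pvIntDigits? na).getD 0) := by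
        by_cases h : na = [] <;> simp [count_atom_step, hA, pvIntDigits?, h]
      simp only [List.cons_append, List.foldl_cons, hstep]
      rw [ih]
      have hS : pvS (c :: t) = pvS t := by simp [pvS, pvRuns, hd]
      simp only [List.takeWhile_cons, List.dropWhile_cons, hd, Bool.false_eq_true, if_false,
        List.nil_append, List.append_nil, hS, pvS_split t]
      omega

-- ===== VERDICT (by name: the statement is the Claim_ definition above) =====
theorem count_atom_spec : Claim_equal_count_atom := by
  intro formula _
  unfold Spec_count_atom count_atom count_atom_alt
  rw [key, split₀_mask]
  have := pvS_split formula.toList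
  simp only [List.nil_append] at *
  unfold pvS at this ⊢
  omega
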